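-- pv_equiv track=rewrite | github.com/xperiments/xspool-bin | test.py | transform_path
-- ===== SOURCE A (Python) =====
-- def transform_path(path_str):
--     """
--     1) Remove '/get/all'
--     2) Replace underscores with slashes
--     3) Split by slash
--     4) Capitalize each part
--     5) Join parts with underscores
--     6) If the result starts with '_', remove that underscore
--     7) Remove all remaining underscores
--     8) Lowercase the first letter (or the entire string, as desired)
--     """
--     # Step 1
--     path_str = path_str.replace("/get/all", "")
--
--     # Step 2
--     path_str = path_str.replace("_", "/")
--
--     # Step 3
--     parts = [p for p in path_str.split("/") if p]
--
--     # Step 4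
--     capitalized_parts = [part.capitalize() for part in parts]
--
--     # Step 5
--     keyPath = "_".join(capitalized_parts)
--
--     # Step 6: If the resulting string starts with an underscore, remove it
--     if keyPath.startswith("_"):
--         keyPath = keyPath[1:]
--
--     # Step 7: Remove all remaining underscores
--     keyPath = keyPath.replace("_", "")
--
--     # Step 8: Lowercase the **first** letter (or remove the [1:] part to fully lowercase)
--     if len(keyPath) > 0:
--         keyPath = keyPath[0].lower() + keyPath[1:]
--
--     return keyPath
-- ===== SOURCE B (Python) =====
-- def transform_path(path_str):
--     s = path_str.replace("/get/all", "")
--     words = []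
--     word = []
--     for ch in s:
--         if ch == '/' or ch == '_':
--             if word:
--                 words.append(''.join(word).capitalize())
--                 word = []
--         else:
--             word.append(ch)
--     if word:
--         words.append(''.join(word).capitalize())
--     res = ''.join(words)
--     if res:
--         res = res[0].lower() + res[1:]
--     return res
-- ===== Notes on version B (the rewrite author's own statement) =====
-- stated objective: alternative
-- what changed: A's six-stage string pipeline (underscore-to-slash replace, split on slashes, capitalize parts, join with underscores, strip and remove underscores) is replaced by one left-to-right scan that treats slash and underscore as delimiters and appends each closed word's .capitalize() directly, then lowercases the first character.
import Mathlib
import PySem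

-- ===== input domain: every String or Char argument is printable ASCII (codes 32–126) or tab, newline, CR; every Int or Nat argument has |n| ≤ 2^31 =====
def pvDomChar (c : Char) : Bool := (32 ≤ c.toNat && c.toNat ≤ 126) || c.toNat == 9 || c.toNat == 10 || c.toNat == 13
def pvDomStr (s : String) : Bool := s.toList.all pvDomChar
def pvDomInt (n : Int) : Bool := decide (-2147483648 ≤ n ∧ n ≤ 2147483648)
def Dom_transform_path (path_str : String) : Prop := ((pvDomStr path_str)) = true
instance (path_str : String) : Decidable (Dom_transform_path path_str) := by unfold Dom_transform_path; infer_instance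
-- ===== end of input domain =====

-- B replaces A's replace/split/capitalize/join/strip-underscores pipeline by one left-to-right scan that
-- closes a capitalized word at each slash or underscore delimiter; same result, a different decomposition (no speed claim).

-- shared helper: str.capitalize (exact on ASCII, where title-casing the first char = upper-casing it)
def pvCap (w : List Char) : List Char :=
  match w with
  | [] => []
  | c :: t => PySem.Chars.upperChar c :: PySem.Chars.lower t

-- shared helper: the final step both Pythons share: `if kp: kp = kp[0].lower() + kp[1:]`
def pvLowerFirst (kp : List Char) : List Char :=
  if 0 < kp.length then
    match kp with
    | [] => []
    | c :: t => PySem.Chars.lowerChar c :: t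
  else kp

-- ===== PORT A =====
def transform_path (path_str : String) : String :=
  let s1 := PySem.Chars.replace path_str.toList "/get/all".toList []        -- Step 1
  let s2 := PySem.Chars.replace s1 ['_'] ['/']                              -- Step 2
  let parts := (PySem.Chars.splitOn s2 ['/']).filter (fun p => !p.isEmpty)  -- Step 3
  let capd := parts.map pvCap                                               -- Step 4
  let kp0 := PySem.Chars.join ['_'] capd                                    -- Step 5
  let kp1 := if PySem.Chars.startswith kp0 ['_']                            -- Step 6
             then PySem.Chars.slice kp0 (some 1) none else kp0
  let kp2 := PySem.Chars.replace kp1 ['_'] []                               -- Step 7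
  String.ofList (pvLowerFirst kp2)                                          -- Step 8

-- ===== PORT B =====
-- loop state: (words so far, current word buffer)
def pvStepB (st : List (List Char) × List Char) (ch : Char) : List (List Char) × List Char :=
  if ch = '/' ∨ ch = '_' then
    (if st.2.isEmpty then st else (st.1 ++ [pvCap st.2], []))
  else (st.1, st.2 ++ [ch])

def transform_path_alt (path_str : String) : String :=
  let s := PySem.Chars.replace path_str.toList "/get/all".toList []
  let st := s.foldl pvStepB ([], [])
  let words := if st.2.isEmpty then st.1 else st.1 ++ [pvCap st.2]
  let res := PySem.Chars.join [] words                                      -- ''.join(words)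
  String.ofList (pvLowerFirst res)

-- ===== PRECONDITION & SPEC =====
def Spec_transform_path (path_str : String) (out : String) : Prop := out = transform_path_alt path_str
instance (path_str : String) (out : String) : Decidable (Spec_transform_path path_str out) := by unfold Spec_transform_path; infer_instance

-- ===== CLAIM (what is proved, stated in full; the proofs are below) =====
def Claim_equal_transform_path : Prop := ∀ (path_str : String), Dom_transform_path path_str → Spec_transform_path path_str (transform_path path_str)

-- ===== LEMMAS AND PROOFS =====

-- the pieces of splitting on '/' (reversed current-piece accumulator), mirroring splitOn.go without fuel
def pvSp (cur : List Char) : List Char → List (List Char)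
  | [] => [cur.reverse]
  | c :: t => if c = '/' then cur.reverse :: pvSp [] t else pvSp (c :: cur) t

-- concatenation of the capitalized words of `cs` given the pending word buffer `word`
def pvBody (word : List Char) : List Char → List Char
  | [] => if word.isEmpty then [] else pvCap word
  | c :: t =>
    if c = '/' ∨ c = '_' then
      (if word.isEmpty then pvBody [] t else pvCap word ++ pvBody [] t)
    else pvBody (word ++ [c]) t

def pvSub (c : Char) : Char := if c = '_' then '/' else c

-- single-char replace is a flatMap
theorem pvReplaceGo (d : Char) (new : List Char) :
    ∀ (l : List Char) (fuel : Nat) (acc : List Char), l.length ≤ fuel →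
      PySem.Chars.replace.go [d] new fuel l acc
        = acc.reverse ++ l.flatMap (fun c => if c = d then new else [c]) := by
  intro l
  induction l with
  | nil => intro fuel acc h; cases fuel <;> simp [PySem.Chars.replace.go]
  | cons c t ih =>
    intro fuel acc h
    cases fuel with
    | zero => simp at h
    | succ f =>
      rw [PySem.Chars.replace.go]
      by_cases hc : c = d
      · subst hc
        simp [List.isPrefixOf, ih f (new.reverse ++ acc) (by simpa using h)]
      · have hc' : ¬ d = c := fun h' => hc h'.symm
        simp [List.isPrefixOf, hc', hc, ih f (c :: acc) (by simpa using h)]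

theorem pvReplaceChar (l : List Char) (d : Char) (new : List Char) :
    PySem.Chars.replace l [d] new = l.flatMap (fun c => if c = d then new else [c]) := by
  simp [PySem.Chars.replace, pvReplaceGo d new l l.length [] le_rfl]

theorem pvSplitGo :
    ∀ (l : List Char) (fuel : Nat) (cur : List Char) (acc : List (List Char)), l.length ≤ fuel →
      PySem.Chars.splitOn.go ['/'] fuel l cur acc = acc.reverse ++ pvSp cur l := by
  intro l
  induction l with
  | nil => intro fuel cur acc h; cases fuel <;> simp [PySem.Chars.splitOn.go, pvSp]
  | cons c t ih =>
    intro fuel cur acc h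
    cases fuel with
    | zero => simp at h
    | succ f =>
      rw [PySem.Chars.splitOn.go]
      by_cases hc : c = '/'
      · subst hc
        simp [List.isPrefixOf, pvSp, ih f [] (cur.reverse :: acc) (by simpa using h)]
      · have hc' : ¬ '/' = c := fun h' => hc h'.symm
        simp [List.isPrefixOf, hc', hc, pvSp, ih f (c :: cur) acc (by simpa using h)]

theorem pvSplitChar (l : List Char) :
    PySem.Chars.splitOn l ['/'] = pvSp [] l := by
  simp [PySem.Chars.splitOn, pvSplitGo l (l.length + 1) [] [] (by omega)]

-- upperChar / lowerChar never produce '_' from a non-'_' char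
theorem pvUpperNe (c : Char) (h : c ≠ '_') : PySem.Chars.upperChar c ≠ '_' := by
  unfold PySem.Chars.upperChar PySem.Chars.islower
  split_ifs with hl
  · simp only [decide_eq_true_eq, Bool.and_eq_true] at hl
    have h1 : 97 ≤ c.toNat := hl.1
    have h2 : c.toNat ≤ 122 := hl.2
    intro he
    have hv : (c.toNat - 32).isValidChar := Or.inl (by omega)
    have := congrArg Char.toNat he
    rw [Char.toNat_ofNat, if_pos hv] at this
    change _ = 95 at this
    omega
  · exact h

theorem pvLowerNe (c : Char) (h : c ≠ '_') : PySem.Chars.lowerChar c ≠ '_' := by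
  unfold PySem.Chars.lowerChar PySem.Chars.isupper
  split_ifs with hl
  · simp only [decide_eq_true_eq, Bool.and_eq_true] at hl
    have h1 : 65 ≤ c.toNat := hl.1
    have h2 : c.toNat ≤ 90 := hl.2
    intro he
    have hv : (c.toNat + 32).isValidChar := Or.inl (by omega)
    have := congrArg Char.toNat he
    rw [Char.toNat_ofNat, if_pos hv] at this
    change _ = 95 at this
    omega
  · exact h

theorem pvCapNoUnderscore (w : List Char) (h : ∀ c ∈ w, c ≠ '_') :
    ∀ c ∈ pvCap w, c ≠ '_' := by
  cases w with
  | nil => simp [pvCap]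
  | cons a t =>
    intro c hc
    simp only [pvCap, List.mem_cons] at hc
    rcases hc with rfl | hc
    · exact pvUpperNe a (h a (by simp))
    · simp only [PySem.Chars.lower, List.mem_map] at hc
      obtain ⟨b, hb, rfl⟩ := hc
      exact pvLowerNe b (h b (by simp [hb]))

-- pieces of pvSp draw their chars from cur and l
theorem pvSpChars : ∀ (l cur : List Char), (∀ c ∈ l, c ≠ '_') → (∀ c ∈ cur, c ≠ '_') →
    ∀ w ∈ pvSp cur l, ∀ c ∈ w, c ≠ '_' := by
  intro l
  induction l with
  | nil =>
    intro cur hl hcur w hw c hc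
    simp only [pvSp, List.mem_singleton] at hw
    subst hw; exact hcur c (by simpa using hc)
  | cons a t ih =>
    intro cur hl hcur w hw c hc
    by_cases ha : a = '/'
    · rw [show pvSp cur (a :: t) = cur.reverse :: pvSp [] t by simp [pvSp, ha]] at hw
      rcases List.mem_cons.mp hw with rfl | hw
      · exact hcur c (by simpa using hc)
      · exact ih [] (fun x hx => hl x (by simp [hx])) (by simp) w hw c hc
    · rw [show pvSp cur (a :: t) = pvSp (a :: cur) t by simp [pvSp, ha]] at hw
      refine ih (a :: cur) (fun x hx => hl x (by simp [hx])) ?_ w hw c hc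
      intro x hx
      rcases List.mem_cons.mp hx with rfl | hx
      · exact hl x (by simp)
      · exact hcur x hx

-- filtering '_' out of a '_'-free list is the identity
theorem pvFlatMapId (l : List Char) (h : ∀ c ∈ l, c ≠ '_') :
    l.flatMap (fun c => if c = '_' then ([] : List Char) else [c]) = l := by
  induction l with
  | nil => simp
  | cons a t ih =>
    simp only [List.flatMap_cons, if_neg (h a (by simp))]
    rw [ih (fun c hc => h c (by simp [hc]))]
    simp

-- removing '_' from a '_'-join of '_'-free words is their concatenation
theorem pvJoinFilter : ∀ (ws : List (List Char)), (∀ w ∈ ws, ∀ c ∈ w, c ≠ '_') →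
    (PySem.Chars.join ['_'] ws).flatMap (fun c => if c = '_' then ([] : List Char) else [c])
      = ws.flatten := by
  intro ws
  induction ws with
  | nil => simp [PySem.Chars.join_nil]
  | cons w rest ih =>
    intro h
    cases rest with
    | nil => simp [PySem.Chars.join_singleton, pvFlatMapId w (h w (by simp))]
    | cons q r =>
      rw [PySem.Chars.join_cons_cons]
      simp only [List.flatMap_append]
      rw [pvFlatMapId w (h w (by simp)), ih (fun v hv => h v (by simp [hv]))]
      simp

-- a '_'-join of words whose heads are not '_' never starts with '_'
theorem pvStartFalse (ws : List (List Char)) (h : ∀ w ∈ ws, w ≠ [] ∧ w.head? ≠ some '_') :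
    PySem.Chars.startswith (PySem.Chars.join ['_'] ws) ['_'] = false := by
  cases ws with
  | nil => simp [PySem.Chars.join_nil, PySem.Chars.startswith]
  | cons w rest =>
    obtain ⟨hne, hhd⟩ := h w (by simp)
    cases w with
    | nil => exact absurd rfl hne
    | cons a t =>
      have hhd' : a ≠ '_' := by simpa using hhd
      have ha : ¬ '_' = a := fun h' => hhd' h'.symm
      cases rest with
      | nil => simp [PySem.Chars.join_singleton, PySem.Chars.startswith, List.isPrefixOf, ha]
      | cons q r =>
        rw [PySem.Chars.join_cons_cons]
        simp [PySem.Chars.startswith, List.isPrefixOf, ha]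

-- A's split pipeline equals pvBody
theorem pvSpBody : ∀ (cs cur : List Char),
    (((pvSp cur (cs.map pvSub)).filter (fun p => !p.isEmpty)).map pvCap).flatten
      = pvBody cur.reverse cs := by
  intro cs
  induction cs with
  | nil =>
    intro cur
    by_cases h : cur = [] <;> simp [pvSp, pvBody, h, List.isEmpty_iff]
  | cons c t ih =>
    intro cur
    by_cases hd : c = '/' ∨ c = '_'
    · have hsub : pvSub c = '/' := by rcases hd with h | h <;> simp [pvSub, h]
      have hstep : pvSp cur ((c :: t).map pvSub) = cur.reverse :: pvSp [] (t.map pvSub) := by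
        simp [pvSp, hsub]
      have hbody : pvBody cur.reverse (c :: t)
          = if cur.reverse.isEmpty then pvBody [] t else pvCap cur.reverse ++ pvBody [] t := by
        simp [pvBody, hd]
      have hih := ih []
      simp only [List.reverse_nil] at hih
      rw [hstep, hbody]
      by_cases h : cur = []
      · simp [h, hih]
      · have hcap : (pvCap cur.reverse).isEmpty = false := by
          cases hrev : cur.reverse with
          | nil => exact absurd (by simpa using hrev) h
          | cons a u => simp [pvCap]
        simp [List.isEmpty_iff, h, hih]
    · have hc : c ≠ '_' := fun h => hd (Or.inr h)
      have hsub : pvSub c = c := by simp [pvSub, hc]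
      have hstep : pvSp cur ((c :: t).map pvSub) = pvSp (c :: cur) (t.map pvSub) := by
        simp only [List.map_cons, hsub, pvSp]
        rw [if_neg (fun h => hd (Or.inl h))]
      have hbody : pvBody cur.reverse (c :: t) = pvBody (cur.reverse ++ [c]) t := by
        simp [pvBody, hd]
      have hih := ih (c :: cur)
      simp only [List.reverse_cons] at hih
      rw [hstep, hbody, hih]

-- B's fold equals pvBody
theorem pvFoldB : ∀ (cs : List Char) (out : List (List Char)) (word : List Char),
    (if (cs.foldl pvStepB (out, word)).2.isEmpty then (cs.foldl pvStepB (out, word)).1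
     else (cs.foldl pvStepB (out, word)).1 ++ [pvCap (cs.foldl pvStepB (out, word)).2]).flatten
      = out.flatten ++ pvBody word cs := by
  intro cs
  induction cs with
  | nil =>
    intro out word
    by_cases h : word = [] <;> simp [pvBody, h, List.isEmpty_iff]
  | cons c t ih =>
    intro out word
    by_cases hd : c = '/' ∨ c = '_'
    · by_cases h : word = []
      · have hstep : pvStepB (out, word) c = (out, word) := by simp [pvStepB, hd, h]
        rw [List.foldl_cons, hstep, ih out word]
        simp [pvBody, hd, h]
      · have hstep : pvStepB (out, word) c = (out ++ [pvCap word], []) := by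
          simp [pvStepB, hd, List.isEmpty_iff, h]
        rw [List.foldl_cons, hstep, ih (out ++ [pvCap word]) []]
        simp [pvBody, hd, List.isEmpty_iff, h]
    · have hstep : pvStepB (out, word) c = (out, word ++ [c]) := by simp [pvStepB, hd]
      rw [List.foldl_cons, hstep, ih out (word ++ [c])]
      simp [pvBody, hd]

-- every char of the '_'→'/' image is ≠ '_'
theorem pvSubNe (cs : List Char) : ∀ c ∈ cs.map pvSub, c ≠ '_' := by
  intro c hc
  simp only [List.mem_map] at hc
  obtain ⟨b, _, rfl⟩ := hc
  by_cases hb : b = '_'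
  · simp [pvSub, hb]
  · simp [pvSub, hb]

-- ''.join is concatenation
theorem pvJoinNilFlatten (ws : List (List Char)) : PySem.Chars.join [] ws = ws.flatten := by
  induction ws with
  | nil => simp [PySem.Chars.join_nil]
  | cons w rest ih =>
    cases rest with
    | nil => simp [PySem.Chars.join_singleton]
    | cons q r => rw [PySem.Chars.join_cons_cons, ih]; simp

-- ===== VERDICT (by name: the statement is the Claim_ definition above) =====
theorem transform_path_spec : Claim_equal_transform_path := by
  intro path_str _
  show transform_path path_str = transform_path_alt path_str
  unfold transform_path transform_path_alt
  dsimp only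
  generalize PySem.Chars.replace path_str.toList "/get/all".toList [] = s1
  -- A side
  rw [pvReplaceChar s1 '_' ['/']]
  have hfun : (fun c : Char => if c = '_' then ['/'] else [c]) = fun c : Char => [pvSub c] := by
    funext c
    by_cases h : c = '_' <;> simp [pvSub, h]
  rw [hfun, ← List.map_eq_flatMap, pvSplitChar]
  have hcharsW : ∀ w ∈ (pvSp [] (s1.map pvSub)).filter (fun p => !p.isEmpty), ∀ c ∈ w, c ≠ '_' := by
    intro w hw
    exact pvSpChars (s1.map pvSub) [] (pvSubNe s1) (by simp) w (List.mem_of_mem_filter hw)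
  have hcharsC : ∀ w ∈ ((pvSp [] (s1.map pvSub)).filter (fun p => !p.isEmpty)).map pvCap,
      ∀ c ∈ w, c ≠ '_' := by
    intro w hw
    simp only [List.mem_map] at hw
    obtain ⟨v, hv, rfl⟩ := hw
    exact pvCapNoUnderscore v (hcharsW v hv)
  have hstart : PySem.Chars.startswith
      (PySem.Chars.join ['_'] (((pvSp [] (s1.map pvSub)).filter (fun p => !p.isEmpty)).map pvCap))
      ['_'] = false := by
    apply pvStartFalse
    intro w hw
    simp only [List.mem_map] at hw
    obtain ⟨v, hv, rfl⟩ := hw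
    have hvne : v ≠ [] := by
      have := List.of_mem_filter hv
      simpa [List.isEmpty_iff] using this
    cases v with
    | nil => exact absurd rfl hvne
    | cons a u =>
      refine ⟨by simp [pvCap], ?_⟩
      simp only [pvCap, List.head?_cons, ne_eq, Option.some.injEq]
      exact pvUpperNe a (hcharsW _ hv a (by simp))
  rw [hstart]
  simp only [Bool.false_eq_true, if_false]
  rw [pvReplaceChar _ '_' [], pvJoinFilter _ hcharsC, pvSpBody s1 []]
  simp only [List.reverse_nil]
  -- B side
  have hB := pvFoldB s1 [] []
  simp only [List.flatten_nil, List.nil_append] at hB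
  rw [pvJoinNilFlatten, hB]
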